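-- pv_equiv track=rewrite | github.com/kel0508/PUC-CAMPINAS | Python/Aula_27_04.py | discMaiorNota
-- ===== SOURCE A (Python) =====
-- def discMaiorNota(L):
--     posMaiorNota = 0
--     posicaoAtual = 1
--     while posicaoAtual < len(L):
--         if L[posicaoAtual][1] > L[posMaiorNota][1]:
--             posMaiorNota = posicaoAtual
--
--         posicaoAtual += 1
--     return L[posMaiorNota][0]
-- ===== SOURCE B (Python) =====
-- def discMaiorNota(L):
--     return sorted(L, key=lambda x: x[1], reverse=True)[0][0]
-- ===== Notes on version B (the rewrite author's own statement) =====
-- stated objective: simpler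
-- what changed: B replaces the manual index-tracking while-loop scan for the maximum with a stable reverse sort on the grade key and returns the first element's name; stability with reverse=True preserves A's earliest-index tie-breaking, and both raise IndexError on the empty list.
import Mathlib
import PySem

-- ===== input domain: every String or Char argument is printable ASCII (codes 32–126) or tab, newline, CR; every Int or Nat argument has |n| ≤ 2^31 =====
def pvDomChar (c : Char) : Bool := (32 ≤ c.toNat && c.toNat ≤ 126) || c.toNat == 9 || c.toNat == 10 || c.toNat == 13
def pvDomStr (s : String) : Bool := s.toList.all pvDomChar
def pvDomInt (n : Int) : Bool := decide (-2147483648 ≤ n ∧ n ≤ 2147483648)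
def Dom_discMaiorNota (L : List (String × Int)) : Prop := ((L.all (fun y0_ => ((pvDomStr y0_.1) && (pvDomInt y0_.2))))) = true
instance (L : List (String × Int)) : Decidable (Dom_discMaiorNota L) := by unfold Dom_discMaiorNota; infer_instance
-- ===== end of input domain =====

-- B replaces A's manual index-tracking max scan by a stable reverse sort on the grade
-- and takes the first element's name (simpler, same tie-breaking by stability).


-- ===== PORT A =====
-- A's while-loop over positions 1..len(L)-1 is the foldl over List.range' 1 (L.length-1);
-- every index reached by the loop is in range, so List.getD is exact there.
def discMaiorNota (L : List (String × Int)) : String :=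
  let posMaiorNota : Nat := (List.range' 1 (L.length - 1)).foldl
      (fun posMaiorNota posicaoAtual =>
        if (L.getD posicaoAtual ("", 0)).2 > (L.getD posMaiorNota ("", 0)).2 then posicaoAtual
        else posMaiorNota) 0
  match PySem.List.pyGet? L (posMaiorNota : Int) with
  | some p => p.1
  | none => ""  -- Python raises IndexError here (only reachable when L = []); excluded by Pre_

-- ===== PORT B =====
def discMaiorNota_alt (L : List (String × Int)) : String :=
  match PySem.List.sorted L (fun p => p.2) true with
  | p :: _ => p.1
  | [] => ""  -- sorted([])[0] raises IndexError in Python; excluded by Pre_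

-- ===== PRECONDITION & SPEC =====
-- Pre_: both A and B raise IndexError on the empty list.
def Pre_discMaiorNota (L : List (String × Int)) : Prop := L ≠ []
instance (L : List (String × Int)) : Decidable (Pre_discMaiorNota L) := by unfold Pre_discMaiorNota; infer_instance
def pvWitness_discMaiorNota : (List (String × Int)) := [("a", 1)]
def Spec_discMaiorNota (L : List (String × Int)) (out : String) : Prop := out = discMaiorNota_alt L
instance (L : List (String × Int)) (out : String) : Decidable (Spec_discMaiorNota L out) := by unfold Spec_discMaiorNota; infer_instance

-- ===== CLAIM (what is proved, stated in full; the proofs are below) =====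
def Claim_equal_discMaiorNota : Prop := ∀ (L : List (String × Int)), Dom_discMaiorNota L → Pre_discMaiorNota L → Spec_discMaiorNota L (discMaiorNota L)

-- ===== LEMMAS AND PROOFS =====

-- the common "running best" value fold both programs compute
def pvBest (a x : String × Int) : String × Int := if a.2 < x.2 then x else a

def pvBf (a b : String × Int) : Bool := decide (b.2 < a.2)

-- head of the insertion accumulator is the running best (stability of the reverse sort)
theorem pv_fold_insert_head (t : List (String × Int)) :
    ∀ (a : String × Int) (acc : List (String × Int)),
    ∃ zs, t.foldl (fun acc x => PySem.List.insertBy pvBf x acc) (a :: acc)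
          = (t.foldl pvBest a) :: zs := by
  induction t with
  | nil => intro a acc; exact ⟨acc, rfl⟩
  | cons x t ih =>
    intro a acc
    simp only [List.foldl_cons]
    by_cases h : a.2 < x.2
    · have : PySem.List.insertBy pvBf x (a :: acc) = x :: a :: acc := by
        simp [PySem.List.insertBy, pvBf, h]
      rw [this]
      have hb : pvBest a x = x := by simp [pvBest, h]
      rw [hb]
      exact ih x (a :: acc)
    · have : PySem.List.insertBy pvBf x (a :: acc)
          = a :: PySem.List.insertBy pvBf x acc := by
        simp [PySem.List.insertBy, pvBf, h]
      rw [this]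
      have hb : pvBest a x = a := by simp [pvBest, h]
      rw [hb]
      exact ih a _

-- A's index fold tracks the same running best over the first k tail elements
theorem pv_index_fold (x : String × Int) (t : List (String × Int)) :
    ∀ k, k ≤ t.length →
    let L := x :: t
    let b := (List.range' 1 k).foldl
      (fun pb pa => if (L.getD pa ("", 0)).2 > (L.getD pb ("", 0)).2 then pa else pb) 0
    b ≤ t.length ∧ L.getD b ("", 0) = (t.take k).foldl pvBest x := by
  intro k
  induction k with
  | zero => intro _; exact ⟨Nat.zero_le _, rfl⟩
  | succ k ih =>
    intro hk
    have hk' : k ≤ t.length := Nat.le_of_succ_le hk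
    obtain ⟨hble, hval⟩ := ih hk'
    have hklt : k < t.length := hk
    simp only [List.range'_concat, List.foldl_append, List.foldl_cons, List.foldl_nil]
    have hidx : (1 + 1 * k) = k + 1 := by omega
    rw [hidx]
    have hget : (x :: t).getD (k + 1) ("", 0) = t[k] := by
      simp [List.getD, List.getElem?_eq_getElem hklt]
    have htake : t.take (k + 1) = t.take k ++ [t[k]] := by
      rw [List.take_add_one, List.getElem?_eq_getElem hklt]; rfl
    rw [htake, List.foldl_append, List.foldl_cons, List.foldl_nil]
    by_cases h : ((x :: t).getD (k + 1) ("", 0)).2 > ((x :: t).getD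
        ((List.range' 1 k).foldl (fun pb pa =>
          if (( x :: t).getD pa ("", 0)).2 > ((x :: t).getD pb ("", 0)).2 then pa else pb) 0)
        ("", 0)).2
    · rw [if_pos h]
      refine ⟨hk, ?_⟩
      rw [hget]
      rw [hval, hget] at h
      simp [pvBest, h]
    · rw [if_neg h]
      refine ⟨hble, ?_⟩
      rw [hval, hget] at h
      have : pvBest ((t.take k).foldl pvBest x) t[k] = (t.take k).foldl pvBest x := by
        simp only [pvBest]
        rw [if_neg (by exact fun hc => h hc)]
      rw [this, hval]

-- ===== VERDICT (by name: the statement is the Claim_ definition above) =====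
theorem discMaiorNota_spec : Claim_equal_discMaiorNota := by
  intro L _ hpre
  unfold Spec_discMaiorNota
  match L, hpre with
  | x :: t, _ =>
    -- B's side: head of the reverse-stable sort is the running best
    have hB : ∃ zs, PySem.List.sorted (x :: t) (fun p => p.2) true = (t.foldl pvBest x) :: zs := by
      rw [PySem.List.sorted_rev_eq_foldl_insertBy]
      simp only [List.foldl_cons]
      have h0 : PySem.List.insertBy (fun a b => decide (b.2 < a.2)) x [] = [x] := by
        simp [PySem.List.insertBy]
      have hbf : (fun a b : String × Int => decide (b.2 < a.2)) = pvBf := rfl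
      rw [h0, hbf]
      exact pv_fold_insert_head t x []
    obtain ⟨zs, hzs⟩ := hB
    -- A's side
    obtain ⟨hble, hval⟩ := pv_index_fold x t t.length (le_refl _)
    rw [List.take_length] at hval
    unfold discMaiorNota discMaiorNota_alt
    rw [hzs]
    simp only []
    set b := (List.range' 1 ((x :: t).length - 1)).foldl
      (fun pb pa => if ((x :: t).getD pa ("", 0)).2 > ((x :: t).getD pb ("", 0)).2 then pa else pb) 0 with hbdef
    have hlen : (x :: t).length - 1 = t.length := by simp
    have hblt : b < (x :: t).length := by
      rw [hbdef, hlen]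
      simp only [List.length_cons]
      omega
    rw [PySem.List.pyGet?_natCast, List.getElem?_eq_getElem hblt]
    have : (x :: t)[b] = t.foldl pvBest x := by
      have := hval
      rw [hlen] at hbdef
      rw [← hbdef] at this
      rw [← this]
      simp [List.getD, List.getElem?_eq_getElem hblt]
    rw [this]
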